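-- pv_equiv track=rewrite | github.com/azariaa/ENC | PythonScripts/helperFunctions.py | chunkNEROutput
-- ===== SOURCE A (Python) =====
-- def chunkNEROutput(ner_output):
--     chunked, pos = [], ""
--     prev_tag=''
--     prev_tag = ""
--     for i, word_pos in enumerate(ner_output):
--         word, pos = word_pos
--         if pos in ['PERSON', 'ORGANIZATION', 'LOCATION'] and pos == prev_tag:
--             chunked[-1]+=word_pos
--         else:
--             chunked.append(word_pos)
--
--         prev_tag = pos
--
--     clean_chunked = [tuple([" ".join(wordpos[::2]), wordpos[-1]]) if len(wordpos)!=2 else wordpos for wordpos in chunked]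
--     return clean_chunked
-- ===== SOURCE B (Python) =====
-- def chunkNEROutput(ner_output):
--     NE = ('PERSON', 'ORGANIZATION', 'LOCATION')
--     result = []
--     i, n = 0, len(ner_output)
--     while i < n:
--         tag = ner_output[i][1]
--         j = i + 1
--         if tag in NE:
--             while j < n and ner_output[j][1] == tag:
--                 j += 1
--         if j == i + 1:
--             result.append(ner_output[i])
--         else:
--             result.append((' '.join(w for w, _ in ner_output[i:j]), tag))
--         i = j
--     return result
-- ===== Notes on version B (the rewrite author's own statement) =====
-- stated objective: simpler
-- what changed: Instead of folding with a prev_tag variable into variable-length flattened tuples and then decoding them with a [::2]-slice cleanup pass, B scans spans: for each position it advances an index over the run of equal NE tags and emits the final pair directly, with no intermediate encoding and no second pass.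
import Mathlib
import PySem

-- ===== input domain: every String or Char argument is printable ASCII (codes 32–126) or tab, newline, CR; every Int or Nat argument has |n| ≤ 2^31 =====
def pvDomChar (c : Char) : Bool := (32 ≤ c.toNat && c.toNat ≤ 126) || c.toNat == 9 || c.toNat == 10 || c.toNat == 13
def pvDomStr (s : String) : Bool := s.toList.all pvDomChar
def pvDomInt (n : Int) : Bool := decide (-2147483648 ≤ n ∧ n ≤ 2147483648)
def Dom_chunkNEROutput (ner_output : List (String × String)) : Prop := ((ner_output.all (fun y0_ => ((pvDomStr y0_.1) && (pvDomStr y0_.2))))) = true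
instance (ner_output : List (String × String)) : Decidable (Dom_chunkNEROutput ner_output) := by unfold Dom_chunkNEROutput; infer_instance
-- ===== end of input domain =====

-- B replaces A's fold into variable-length flattened tuples plus a [::2]-slice cleanup pass
-- with a single span scan that emits each chunk's final pair directly (objective: simpler).

-- ===== PORT A =====
def neTags : List String := ["PERSON", "ORGANIZATION", "LOCATION"]

-- chunked[-1] += word_pos : tuple concatenation onto the last element (hand-ported, exact;
-- the [] case is where Python's chunked[-1] would raise, unreachable because the merge guard
-- requires a previously appended element)
def pyAddLast : List (List String) → List String → List (List String)
  | [], _ => []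
  | [a], x => [a ++ x]
  | a :: b :: r, x => a :: pyAddLast (b :: r) x

-- loop body: state = (chunked, prev_tag); a flattened tuple is a List String
def aStep (acc : List (List String) × String) (wp : String × String) : List (List String) × String :=
  if wp.2 ∈ neTags ∧ wp.2 = acc.2 then (pyAddLast acc.1 [wp.1, wp.2], wp.2)
  else (acc.1 ++ [[wp.1, wp.2]], wp.2)

-- tuple(" ".join(wordpos[::2]), wordpos[-1]) if len(wordpos) != 2 else wordpos
-- (the .getD defaults are unreachable: entries are nonempty and the slice step is 2 ≠ 0)
def aClean (wordpos : List String) : String × String :=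
  if wordpos.length ≠ 2 then
    (PySem.Str.join " " ((PySem.List.slice? wordpos none none 2).getD []),
     (PySem.List.pyGet? wordpos (-1)).getD "")
  else
    match wordpos with
    | [a, b] => (a, b)
    | _ => ("", "")

def chunkNEROutput (ner_output : List (String × String)) : List (String × String) :=
  ((ner_output.foldl aStep ([], "")).1).map aClean

-- ===== PORT B =====
-- outer while over index i transcribed as recursion on the remaining suffix;
-- the inner while counting the run of equal NE tags is the takeWhile length k
def chunkNEROutput_alt : List (String × String) → List (String × String)
  | [] => []
  | (w, t) :: rest =>
    let k := if t ∈ neTags then (rest.takeWhile (fun p => p.2 == t)).length else 0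
    if k = 0 then (w, t) :: chunkNEROutput_alt rest
    else (PySem.Str.join " " (w :: (rest.take k).map Prod.fst), t) ::
           chunkNEROutput_alt (rest.drop k)
termination_by l => l.length
decreasing_by
  all_goals simp

-- ===== PRECONDITION & SPEC =====
def Spec_chunkNEROutput (ner_output : List (String × String)) (out : List (String × String)) : Prop := out = chunkNEROutput_alt ner_output
instance (ner_output : List (String × String)) (out : List (String × String)) : Decidable (Spec_chunkNEROutput ner_output out) := by unfold Spec_chunkNEROutput; infer_instance

-- ===== CLAIM (what is proved, stated in full; the proofs are below) =====
def Claim_equal_chunkNEROutput : Prop := ∀ (ner_output : List (String × String)), Dom_chunkNEROutput ner_output → Spec_chunkNEROutput ner_output (chunkNEROutput ner_output)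

-- ===== LEMMAS AND PROOFS =====

-- a merged chunk of k words with common tag t is the flattened tuple [w1,t,w2,t,…]
def interleave (ws : List String) (t : String) : List String :=
  ws.flatMap (fun w => [w, t])

theorem length_interleave (ws : List String) (t : String) :
    (interleave ws t).length = 2 * ws.length := by
  induction ws with
  | nil => rfl
  | cons w ws ih => simp [interleave] at ih ⊢; omega

theorem pyAddLast_append (c : List (List String)) (a x : List String) :
    pyAddLast (c ++ [a]) x = c ++ [a ++ x] := by
  induction c with
  | nil => rfl
  | cons h c' ih =>
    cases c' with
    | nil => rfl
    | cons b r => simpa [pyAddLast] using ih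

theorem interleave_getElem2 (ws : List String) (t : String) :
    ∀ k : Nat, (interleave ws t)[2 * k]? = ws[k]? := by
  induction ws with
  | nil => intro k; simp [interleave]
  | cons w ws ih =>
    intro k
    cases k with
    | zero => simp [interleave]
    | succ k =>
      have h2 : 2 * (k + 1) = 2 * k + 1 + 1 := by omega
      simp [interleave, h2, List.getElem?_cons_succ]
      simpa [interleave] using ih k

theorem filterMap_getElem?_range {α : Type} (ws : List α) :
    List.filterMap (fun k => ws[k]?) (List.range ws.length) = ws := by
  induction ws with
  | nil => rfl
  | cons a l ih =>
    simp [List.range_succ_eq_map, List.filterMap_map]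
    exact ih

theorem slice?_interleave (ws : List String) (t : String) :
    PySem.List.slice? (interleave ws t) none none 2 = some ws := by
  simp only [PySem.List.slice?, PySem.List.sliceIndices]
  norm_num
  have hif : (if 0 < (interleave ws t).length then ((((interleave ws t).length : Int) + 2 - 1)/2).toNat else 0) = ws.length := by
    rw [length_interleave]; split_ifs with h <;> omega
  rw [hif]
  have hcast : (fun (x : Nat) => (interleave ws t)[(2 * (x:Int)).toNat]?) = fun x => ws[x]? := by
    funext x
    have : (2 * (x:Int)).toNat = 2 * x := by omega
    rw [this, interleave_getElem2]
  simp only [hcast]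
  exact filterMap_getElem?_range ws

theorem getLast?_interleave (w : String) (ws : List String) (t : String) :
    (interleave (w :: ws) t).getLast? = some t := by
  induction ws generalizing w with
  | nil => rfl
  | cons w' ws ih => simpa [interleave, List.getLast?_cons] using ih w'

theorem aClean_single (w t : String) : aClean (interleave [w] t) = (w, t) := rfl

theorem aClean_multi (ws : List String) (t : String) (h : 2 ≤ ws.length) :
    aClean (interleave ws t) = (PySem.Str.join " " ws, t) := by
  obtain ⟨w, ws', rfl⟩ : ∃ w ws', ws = w :: ws' := by
    cases ws with
    | nil => simp at h
    | cons w ws' => exact ⟨w, ws', rfl⟩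
  have hl : (w :: ws').length = ws'.length + 1 := by simp
  rw [hl] at h
  have hlen : (interleave (w :: ws') t).length ≠ 2 := by
    rw [length_interleave, hl]; omega
  simp [aClean, hlen, slice?_interleave, PySem.List.pyGet?_neg_one, getLast?_interleave]

theorem take_len_takeWhile {α : Type} (p : α → Bool) (l : List α) :
    l.take (l.takeWhile p).length = l.takeWhile p := by
  induction l with
  | nil => rfl
  | cons a l ih => by_cases h : p a <;> simp [h, ih]

theorem drop_len_takeWhile {α : Type} (p : α → Bool) (l : List α) :
    l.drop (l.takeWhile p).length = l.dropWhile p := by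
  induction l with
  | nil => rfl
  | cons a l ih => by_cases h : p a <;> simp [h, ih]

theorem alt_head (rest : List (String × String)) (w t : String) (ht : t ∈ neTags) :
    chunkNEROutput_alt ((w, t) :: rest)
      = aClean (interleave (w :: (rest.takeWhile (fun p => p.2 == t)).map Prod.fst) t)
          :: chunkNEROutput_alt (rest.dropWhile (fun p => p.2 == t)) := by
  rw [chunkNEROutput_alt]
  simp only [if_pos ht]
  by_cases hk : (rest.takeWhile (fun p => p.2 == t)).length = 0
  · have htw : rest.takeWhile (fun p => p.2 == t) = [] := List.length_eq_zero_iff.mp hk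
    have hdw : rest.dropWhile (fun p => p.2 == t) = rest := by
      rw [← drop_len_takeWhile, htw]; simp
    simp [htw, hdw, aClean_single]
  · have h2 : 2 ≤ (w :: (rest.takeWhile (fun p => p.2 == t)).map Prod.fst).length := by
      simp; omega
    rw [if_neg hk, aClean_multi _ _ h2, take_len_takeWhile, drop_len_takeWhile]

theorem main_off : ∀ n : Nat,
    (∀ (l : List (String × String)) (c : List (List String)) (prev : String),
        l.length ≤ n → prev ∉ neTags →
        ((l.foldl aStep (c, prev)).1).map aClean = c.map aClean ++ chunkNEROutput_alt l)
    ∧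
    (∀ (l : List (String × String)) (c : List (List String)) (w : String) (ws : List String) (t : String),
        l.length ≤ n → t ∈ neTags →
        ((l.foldl aStep (c ++ [interleave (w :: ws) t], t)).1).map aClean
          = c.map aClean
            ++ aClean (interleave ((w :: ws) ++ (l.takeWhile (fun p => p.2 == t)).map Prod.fst) t)
               :: chunkNEROutput_alt (l.dropWhile (fun p => p.2 == t))) := by
  intro n
  induction n with
  | zero =>
    constructor
    · intro l c prev hl _
      have : l = [] := List.eq_nil_of_length_eq_zero (Nat.le_zero.mp hl)
      subst this; simp [chunkNEROutput_alt]
    · intro l c w ws t hl _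
      have : l = [] := List.eq_nil_of_length_eq_zero (Nat.le_zero.mp hl)
      subst this; simp [chunkNEROutput_alt]
  | succ n ih =>
    obtain ⟨ihOff, ihMain⟩ := ih
    constructor
    · -- off: prev ∉ neTags
      intro l c prev hl hprev
      cases l with
      | nil => simp [chunkNEROutput_alt]
      | cons hd rest =>
        obtain ⟨w, p⟩ := hd
        have hlen : rest.length ≤ n := by simp at hl; omega
        have hcond : ¬ (p ∈ neTags ∧ p = prev) := by
          rintro ⟨hmem, rfl⟩; exact hprev hmem
        by_cases hp : p ∈ neTags
        · have hstep : aStep (c, prev) (w, p) = (c ++ [interleave [w] p], p) := by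
            simp [aStep, hcond, interleave]
          rw [List.foldl_cons, hstep, ihMain rest c w [] p hlen hp, alt_head rest w p hp]
          simp
        · have hstep : aStep (c, prev) (w, p) = (c ++ [[w, p]], p) := by
            simp [aStep, hcond]
          rw [List.foldl_cons, hstep, ihOff rest (c ++ [[w, p]]) p hlen hp]
          have halt : chunkNEROutput_alt ((w, p) :: rest) = (w, p) :: chunkNEROutput_alt rest := by
            rw [chunkNEROutput_alt]; simp [hp]
          rw [halt]
          simp [aClean]
    · -- main: inside a chunk with tag t ∈ neTags
      intro l c w ws t hl ht
      cases l with
      | nil => simp [chunkNEROutput_alt]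
      | cons hd rest =>
        obtain ⟨w', p⟩ := hd
        have hlen : rest.length ≤ n := by simp at hl; omega
        by_cases hpt : p = t
        · subst hpt
          have hstep : aStep (c ++ [interleave (w :: ws) p], p) (w', p)
              = (c ++ [interleave (w :: (ws ++ [w'])) p], p) := by
            have hiw : interleave (w :: ws) p ++ [w', p] = interleave (w :: (ws ++ [w'])) p := by
              simp [interleave]
            simp [aStep, ht, pyAddLast_append, hiw]
          rw [List.foldl_cons, hstep, ihMain rest c w (ws ++ [w']) p hlen ht]
          have htw : ((w', p) :: rest).takeWhile (fun q => q.2 == p)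
              = (w', p) :: rest.takeWhile (fun q => q.2 == p) := by
            simp
          have hdw : ((w', p) :: rest).dropWhile (fun q => q.2 == p)
              = rest.dropWhile (fun q => q.2 == p) := by
            simp
          rw [htw, hdw]
          simp
        · have hcond : ¬ (p ∈ neTags ∧ p = t) := fun h => hpt h.2
          have htw : ((w', p) :: rest).takeWhile (fun q => q.2 == t) = [] := by
            simp [hpt]
          have hdw : ((w', p) :: rest).dropWhile (fun q => q.2 == t) = (w', p) :: rest := by
            simp [hpt]
          rw [htw, hdw]
          by_cases hp : p ∈ neTags
          · have hstep : aStep (c ++ [interleave (w :: ws) t], t) (w', p)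
                = ((c ++ [interleave (w :: ws) t]) ++ [interleave [w'] p], p) := by
              simp [aStep, hcond, interleave]
            rw [List.foldl_cons, hstep, ihMain rest (c ++ [interleave (w :: ws) t]) w' [] p hlen hp,
                alt_head rest w' p hp]
            simp
          · have hstep : aStep (c ++ [interleave (w :: ws) t], t) (w', p)
                = ((c ++ [interleave (w :: ws) t]) ++ [[w', p]], p) := by
              simp [aStep, hcond]
            rw [List.foldl_cons, hstep,
                ihOff rest ((c ++ [interleave (w :: ws) t]) ++ [[w', p]]) p hlen hp]
            have halt : chunkNEROutput_alt ((w', p) :: rest) = (w', p) :: chunkNEROutput_alt rest := by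
              rw [chunkNEROutput_alt]; simp [hp]
            rw [halt]
            simp [aClean]

-- ===== VERDICT (by name: the statement is the Claim_ definition above) =====
theorem chunkNEROutput_spec : Claim_equal_chunkNEROutput := by
  intro l _
  unfold Spec_chunkNEROutput chunkNEROutput
  have h := (main_off l.length).1 l [] "" le_rfl (by decide)
  simpa using h
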